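-- pv_equiv track=rewrite | github.com/andremount/nonogram-solver | nonogramSolver.py | getLayoutPossibilities
-- ===== SOURCE A (Python) =====
-- def getLayoutPossibilities(cells, clues):
--
--     # length of the row/column being analyzed
--     seriesLength = len(cells)
--
--     # how many gaps (of length 0 to ? cells) there around the clues
--     gapCount = len(clues) + 1
--
--     # number of empty cells not counting to single empty cell that must appear between clues
--     # (length of series, minus sum of clues, minus one less than the number of clues)
--     emptyCellsNoSpacers = seriesLength - sum(clues) - (len(clues) - 1)
--
--     # get all of the different arrangements of white space
--     gaps = getPartitions(targetSum = emptyCellsNoSpacers, addendCount = gapCount)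
--
--     # given these clues and gaps, generate a list of row possibilities
--     # frist declare an empty list
--     seriesPossibilities = []
--
--     # for each arrangement of empty in gaps
--     for arr in gaps:
--
--         # declare an empty list for the current arrangment
--         thisSeries = []
--
--         # alternate between adding 0-x instances of empty space and the clues in order
--         for i, num in enumerate(arr):
--
--             # add white cells...
--             for _ in range(num):
--                 thisSeries.append(0)
--
--             # add cells according to clues...
--             if i < len(clues):
--
--                 # add filled cells...
--                 for _ in range(clues[i]):
--                     thisSeries.append(1)
--
--                 # add spacer cells (except for after the last clue)
--                 if i < len(clues) - 1:
--                     thisSeries.append(0)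
--
--         # add this arrangement of empty and filled cells to the list of possibilities
--         seriesPossibilities.append(thisSeries)
--
--     return seriesPossibilities
--
-- def getPartitions(targetSum, addendCount, listPosition = 0):
--
--     # this is for when the recursion gets to its maximum depth
--     # the target sum (which is incrementally decreased below) will now be equal to the original target minus anything in the list
--     if addendCount - 1 == listPosition:
--         return [[targetSum]]
--
--     # declare an empty list for the output
--     output = []
--
--     # loop a number of times according to the target sum (plus one to include that sum in the range)
--     for i in range(targetSum + 1):
--
--         # recurse with lowered target sum and increased list position to track recursion depth
--         for item in getPartitions(targetSum - i, addendCount, listPosition = listPosition + 1):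
--
--             # add the result to the output
--             output.append([i] + item)
--
--     return output
-- ===== SOURCE B (Python) =====
-- def getLayoutPossibilities(cells, clues):
--     # free cells = series length minus clue cells minus mandatory spacers
--     free = len(cells) - sum(clues) - (len(clues) - 1)
--
--     # recurse over the clue list directly: place a leading gap, then the clue
--     # (plus a spacer unless it is the last clue), then continue with the rest
--     def place(free, rest, prefix):
--         if not rest:
--             return [prefix + [0] * free]
--         rows = []
--         for gap in range(free + 1):
--             block = prefix + [0] * gap + [1] * rest[0] + ([0] if len(rest) > 1 else [])
--             rows += place(free - gap, rest[1:], block)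
--         return rows
--
--     return place(free, list(clues), [])
-- ===== Notes on version B (the rewrite author's own statement) =====
-- stated objective: alternative
-- what changed: Instead of first enumerating all gap compositions via a separate recursive partition generator and then flattening each composition against the clues with an indexed inner loop, B recurses directly over the clue list, building each row prefix as it goes and emitting completed rows at the base case.
import Mathlib
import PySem

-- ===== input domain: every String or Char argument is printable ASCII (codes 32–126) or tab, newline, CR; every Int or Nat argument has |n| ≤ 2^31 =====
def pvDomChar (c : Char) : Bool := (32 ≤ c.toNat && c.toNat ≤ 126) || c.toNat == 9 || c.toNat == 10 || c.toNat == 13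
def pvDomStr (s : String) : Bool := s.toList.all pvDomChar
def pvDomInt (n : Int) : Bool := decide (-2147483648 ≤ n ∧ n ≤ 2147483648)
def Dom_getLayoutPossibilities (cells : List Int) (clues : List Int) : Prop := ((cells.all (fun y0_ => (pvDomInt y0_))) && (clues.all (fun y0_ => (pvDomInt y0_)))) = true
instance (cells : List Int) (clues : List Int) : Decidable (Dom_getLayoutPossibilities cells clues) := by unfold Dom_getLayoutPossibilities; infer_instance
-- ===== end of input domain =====

-- B replaces A's two-phase scheme (enumerate all gap compositions, then expand each
-- against the clues) by a single recursion over the clue list that builds rows directly.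

-- ===== PORT A =====
-- Python getPartitions(targetSum, addendCount, listPosition): the recursion depth is
-- tracked here as the Nat 'remaining' = addendCount - 1 - listPosition; the entry call
-- (listPosition = 0, addendCount = len(clues)+1 ≥ 1) always has remaining ≥ 0 and the
-- base case 'addendCount - 1 == listPosition' is exactly remaining = 0.
def getPartitions : Int → Nat → List (List Int)
  | targetSum, 0 => [[targetSum]]
  | targetSum, remaining + 1 =>
      -- for i in range(targetSum + 1): for item in recurse(targetSum - i): output.append([i] + item)
      (PySem.List.pyRange 0 (targetSum + 1) 1).foldl
        (fun output i =>
          output ++ (getPartitions (targetSum - i) remaining).map (fun item => i :: item)) []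

-- Python's 'for i, num in enumerate(arr)' loop body, with the running index i and the
-- accumulated thisSeries s carried explicitly.
def buildSeriesAux (clues : List Int) : List Int → Nat → List Int → List Int
  | [], _, s => s
  | num :: rest, i, s =>
      -- append num zeros; then, if i < len(clues), clues[i] ones (the index is in
      -- range, guarded) and a spacer 0 except after the last clue
      buildSeriesAux clues rest (i + 1)
        (if i < clues.length then
          ((s ++ List.replicate num.toNat 0) ++ List.replicate (clues.getD i 0).toNat 1) ++
            (if i < clues.length - 1 then [0] else [])
        else s ++ List.replicate num.toNat 0)

def getLayoutPossibilities (cells : List Int) (clues : List Int) : List (List Int) :=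
  -- emptyCellsNoSpacers = len(cells) - sum(clues) - (len(clues) - 1)
  let emptyCellsNoSpacers : Int := (cells.length : Int) - clues.sum - ((clues.length : Int) - 1)
  -- gaps = getPartitions(emptyCellsNoSpacers, gapCount) with gapCount = len(clues)+1,
  -- i.e. remaining = gapCount - 1 = len(clues)
  let gaps := getPartitions emptyCellsNoSpacers clues.length
  gaps.foldl (fun seriesPossibilities arr =>
    seriesPossibilities ++ [buildSeriesAux clues arr 0 []]) []

-- ===== PORT B =====
-- Source B's place(free, rest, pre): recursion over the remaining clue list.
def placeRow : Int → List Int → List Int → List (List Int)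
  | free, [], pre => [pre ++ List.replicate free.toNat 0]
  | free, c :: cs, pre =>
      (PySem.List.pyRange 0 (free + 1) 1).foldl
        (fun rows gap =>
          rows ++ placeRow (free - gap) cs
            (pre ++ List.replicate gap.toNat 0 ++ List.replicate c.toNat 1 ++
              (if cs.isEmpty then [] else [0]))) []

def getLayoutPossibilities_alt (cells : List Int) (clues : List Int) : List (List Int) :=
  placeRow ((cells.length : Int) - clues.sum - ((clues.length : Int) - 1)) clues []

-- ===== PRECONDITION & SPEC =====
def Spec_getLayoutPossibilities (cells : List Int) (clues : List Int) (out : List (List Int)) : Prop := out = getLayoutPossibilities_alt cells clues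
instance (cells : List Int) (clues : List Int) (out : List (List Int)) : Decidable (Spec_getLayoutPossibilities cells clues out) := by unfold Spec_getLayoutPossibilities; infer_instance

-- ===== CLAIM (what is proved, stated in full; the proofs are below) =====
def Claim_equal_getLayoutPossibilities : Prop := ∀ (cells : List Int) (clues : List Int), Dom_getLayoutPossibilities cells clues → Spec_getLayoutPossibilities cells clues (getLayoutPossibilities cells clues)

-- ===== LEMMAS AND PROOFS =====

-- the row a gap arrangement `gaps` and a clue list denote, written as a plain
-- two-list recursion (the common shape both ports are reduced to)
def ieave : List Int → List Int → List Int
  | g :: gs, c :: cs =>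
      List.replicate g.toNat 0 ++ List.replicate c.toNat 1 ++
        (if cs.isEmpty then [] else [0]) ++ ieave gs cs
  | g :: _, [] => List.replicate g.toNat 0
  | [], _ => []

theorem buildSeriesAux_eq_ieave (clues : List Int) :
    ∀ (arr : List Int) (i : Nat) (s : List Int), arr.length + i = clues.length + 1 →
      buildSeriesAux clues arr i s = s ++ ieave arr (clues.drop i) := by
  intro arr
  induction arr with
  | nil => intro i s _; simp [buildSeriesAux, ieave]
  | cons num rest ih =>
    intro i s h
    cases rest with
    | nil =>
      have hi : i = clues.length := by simp only [List.length_cons, List.length_nil] at h; omega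
      subst hi
      simp [buildSeriesAux, ieave, List.drop_length]
    | cons m t =>
      have hi : i < clues.length := by simp only [List.length_cons] at h; omega
      have hdrop : clues.drop i = clues[i] :: clues.drop (i + 1) :=
        List.drop_eq_getElem_cons hi
      rw [buildSeriesAux, ih (i + 1) _ (by simp only [List.length_cons] at h ⊢; omega),
        hdrop]
      simp only [ieave, if_pos hi, List.getD_eq_getElem _ _ hi]
      by_cases hc : (clues.drop (i + 1)).isEmpty
      · have hlen : clues.length ≤ i + 1 := by
          rwa [List.isEmpty_iff, List.drop_eq_nil_iff] at hc
        rw [if_pos hc, if_neg (by omega)]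
        simp [List.append_assoc]
      · have hlen : ¬ clues.length ≤ i + 1 := by
          rw [List.isEmpty_iff, List.drop_eq_nil_iff] at hc; exact hc
        rw [if_neg hc, if_pos (by omega)]
        simp [List.append_assoc]

theorem placeRow_eq_map : ∀ (rest : List Int) (free : Int) (pre : List Int),
    placeRow free rest pre =
      (getPartitions free rest.length).map (fun arr => pre ++ ieave arr rest) := by
  intro rest
  induction rest with
  | nil => intro free pre; simp [placeRow, getPartitions, ieave]
  | cons c cs ih =>
    intro free pre
    simp only [placeRow, getPartitions, List.length_cons,
      PySem.List.foldl_append_eq_flatMap, List.nil_append, List.map_flatMap]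
    refine List.flatMap_congr ?_
    intro gap _
    rw [ih]
    simp [List.map_map, ieave, Function.comp, List.append_assoc]

theorem mem_getPartitions_length : ∀ (r : Nat) (t : Int) (arr : List Int),
    arr ∈ getPartitions t r → arr.length = r + 1 := by
  intro r
  induction r with
  | zero => intro t arr h; simp [getPartitions] at h; simp [h]
  | succ r ih =>
    intro t arr h
    simp only [getPartitions, PySem.List.foldl_append_eq_flatMap, List.nil_append,
      List.mem_flatMap, List.mem_map] at h
    obtain ⟨i, _, item, hitem, rfl⟩ := h
    simp [ih _ _ hitem]

-- ===== VERDICT (by name: the statement is the Claim_ definition above) =====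
theorem getLayoutPossibilities_spec : Claim_equal_getLayoutPossibilities := by
  intro cells clues _
  unfold Spec_getLayoutPossibilities getLayoutPossibilities getLayoutPossibilities_alt
  rw [PySem.List.foldl_append_singleton_eq_map, placeRow_eq_map]
  simp only [List.nil_append]
  apply List.map_congr_left
  intro arr harr
  rw [buildSeriesAux_eq_ieave clues arr 0 [] (by simp [mem_getPartitions_length _ _ _ harr])]
  simp
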